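-- pv_equiv track=rewrite | github.com/akweury/nesy_causal_p | mbg/scorer/dpl.py | generate_arg_domains
-- ===== SOURCE A (Python) =====
-- def generate_arg_domains(train_examples):
--     img_ids = [f"img{i}" for i in range(len(train_examples))]
--     # If group IDs are shared across images, you need to extract from facts
--     group_ids = set()
--     for example in train_examples:
--         for fact in example["hard_facts"]:
--             if fact == "in_group":
--                 num_groups = len(example["hard_facts"][fact])
--                 for g in range(num_groups):
--                     group_ids.add(f"g{g}")
--     group_ids = sorted(group_ids)
--
--     return {
--         "image_target_img": [img_ids],
--         "group_target_univ": [group_ids, img_ids],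
--         "group_target_exist": [group_ids, img_ids],
--     }
-- ===== SOURCE B (Python) =====
-- def generate_arg_domains(train_examples):
--     img_ids = [f"img{i}" for i in range(len(train_examples))]
--     # Each example contributes the contiguous prefix g0..g{n-1}, so the union
--     # of all these prefixes is just the prefix of the largest n: one max-reduction
--     # replaces the nested set accumulation.
--     max_groups = 0
--     for example in train_examples:
--         max_groups = max(max_groups, len(example["hard_facts"].get("in_group", [])))
--     group_ids = sorted(f"g{g}" for g in range(max_groups))
--     return {
--         "image_target_img": [img_ids],
--         "group_target_univ": [group_ids, img_ids],
--         "group_target_exist": [group_ids, img_ids],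
--     }
-- ===== Notes on version B (the rewrite author's own statement) =====
-- stated objective: simpler
-- what changed: Replaces the nested loop that accumulates a set of 'g{i}' labels with a single max-reduction over the 'in_group' counts followed by one sorted range generation, exploiting that each example contributes a contiguous prefix of labels.
import Mathlib
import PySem

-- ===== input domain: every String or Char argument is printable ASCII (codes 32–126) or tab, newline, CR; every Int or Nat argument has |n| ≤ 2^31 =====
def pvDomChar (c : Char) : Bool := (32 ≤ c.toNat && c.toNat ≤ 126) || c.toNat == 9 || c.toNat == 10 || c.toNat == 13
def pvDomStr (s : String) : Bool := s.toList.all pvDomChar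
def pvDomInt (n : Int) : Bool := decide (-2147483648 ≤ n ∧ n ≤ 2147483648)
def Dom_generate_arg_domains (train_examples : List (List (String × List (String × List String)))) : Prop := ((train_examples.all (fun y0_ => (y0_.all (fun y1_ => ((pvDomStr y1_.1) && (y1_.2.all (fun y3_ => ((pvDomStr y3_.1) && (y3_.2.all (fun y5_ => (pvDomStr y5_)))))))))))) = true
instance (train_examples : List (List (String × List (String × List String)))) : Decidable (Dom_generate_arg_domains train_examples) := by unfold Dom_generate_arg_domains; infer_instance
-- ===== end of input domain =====

-- B replaces A's nested set-accumulation of "g{i}" labels by a single max-reduction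
-- over the per-ex 'in_group' counts plus one sorted range generation (objective: simpler).

-- ===== PORT A =====
-- helpers shared by both ports: the f-strings "img{i}" / "g{g}", the dict-of-pairs
-- conversion (both Pythons receive the examples as dicts) and the returned dict literal,
-- which appear verbatim in both Python sources
def pvGLabel (g : Int) : String := "g" ++ PySem.Int.toStr g
def pvImgIds (n : Nat) : List String := (PySem.List.pyRange 0 (n : Int) 1).map (fun i => "img" ++ PySem.Int.toStr i)
def pvFactsOf (ex : List (String × List (String × List String))) : PySem.Dict String (List String) :=
  PySem.Dict.ofList ((PySem.Dict.ofList ex).getD "hard_facts" [])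
def pvResult (group_ids img_ids : List String) : List (String × List (List String)) :=
  [("image_target_img", [img_ids]),
   ("group_target_univ", [group_ids, img_ids]),
   ("group_target_exist", [group_ids, img_ids])]

def generate_arg_domains (train_examples : List (List (String × List (String × List String)))) : List (String × List (List String)) :=
  let img_ids := pvImgIds train_examples.length
  let group_ids_set : PySem.Set String :=
    train_examples.foldl (fun s ex =>
      let facts := pvFactsOf ex
      facts.keys.foldl (fun s fact =>
        if fact == "in_group" then
          let num_groups := (facts.getD fact []).length
          (PySem.List.pyRange 0 (num_groups : Int) 1).foldl (fun s g => PySem.Set.add s (pvGLabel g)) s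
        else s) s) PySem.Set.empty
  let group_ids := PySem.List.sorted group_ids_set (fun x => x)
  pvResult group_ids img_ids

-- ===== PORT B =====
def generate_arg_domains_alt (train_examples : List (List (String × List (String × List String)))) : List (String × List (List String)) :=
  let img_ids := pvImgIds train_examples.length
  let max_groups : Nat :=
    train_examples.foldl (fun m ex => max m ((pvFactsOf ex).getD "in_group" []).length) 0
  let group_ids := PySem.List.sorted ((PySem.List.pyRange 0 (max_groups : Int) 1).map pvGLabel) (fun x => x)
  pvResult group_ids img_ids

-- ===== PRECONDITION & SPEC =====
-- Pre_ excludes exactly the inputs where some ex lacks the key "hard_facts":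
-- there Python A raises KeyError (and B does too).
def Pre_generate_arg_domains (train_examples : List (List (String × List (String × List String)))) : Prop :=
  ∀ ex ∈ train_examples, (ex.any (fun p => p.1 == "hard_facts")) = true
instance (train_examples : List (List (String × List (String × List String)))) : Decidable (Pre_generate_arg_domains train_examples) := by unfold Pre_generate_arg_domains; infer_instance

def pvWitness_generate_arg_domains : (List (List (String × List (String × List String)))) :=
  [[("hard_facts", [("in_group", ["a", "b"])])]]

def Spec_generate_arg_domains (train_examples : List (List (String × List (String × List String)))) (out : List (String × List (List String))) : Prop := out = generate_arg_domains_alt train_examples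
instance (train_examples : List (List (String × List (String × List String)))) (out : List (String × List (List String))) : Decidable (Spec_generate_arg_domains train_examples out) := by unfold Spec_generate_arg_domains; infer_instance

-- ===== CLAIM (what is proved, stated in full; the proofs are below) =====
def Claim_equal_generate_arg_domains : Prop := ∀ (train_examples : List (List (String × List (String × List String)))), Dom_generate_arg_domains train_examples → Pre_generate_arg_domains train_examples → Spec_generate_arg_domains train_examples (generate_arg_domains train_examples)

-- ===== LEMMAS AND PROOFS =====

-- the per-ex 'in_group' count
def pvN (ex : List (String × List (String × List String))) : Nat :=
  ((pvFactsOf ex).getD "in_group" []).length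

-- injectivity of decimal printing
lemma pvDigitChar_inj : ∀ x < 10, ∀ y < 10, Nat.digitChar x = Nat.digitChar y → x = y := by decide

lemma pvToDigits_eq (a : Nat) :
    Nat.toDigits 10 a = (if a < 10 then ([] : List Char) else Nat.toDigits 10 (a / 10)) ++ [Nat.digitChar (a % 10)] := by
  split_ifs with h
  · rw [Nat.toDigits_of_lt_base h, Nat.mod_eq_of_lt h]; rfl
  · exact Nat.toDigits_of_base_le (by norm_num) (le_of_not_gt h)

lemma pvToDigits_inj : ∀ a b : Nat, Nat.toDigits 10 a = Nat.toDigits 10 b → a = b := by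
  intro a
  induction a using Nat.strong_induction_on with
  | _ a ih =>
    intro b h
    rw [pvToDigits_eq a, pvToDigits_eq b] at h
    rw [← List.concat_eq_append, ← List.concat_eq_append, List.concat_inj] at h
    have hmod : a % 10 = b % 10 :=
      pvDigitChar_inj _ (Nat.mod_lt _ (by norm_num)) _ (Nat.mod_lt _ (by norm_num)) h.2
    by_cases ha : a < 10 <;> by_cases hb : b < 10
    · omega
    · exfalso
      have h1 := h.1; rw [if_pos ha, if_neg hb] at h1
      have hl := Nat.length_toDigits_pos (b := 10) (n := b / 10)
      rw [← h1] at hl; simp at hl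
    · exfalso
      have := h.1; rw [if_neg ha, if_pos hb] at this
      have hl := Nat.length_toDigits_pos (b := 10) (n := a / 10)
      rw [this] at hl; simp at hl
    · have := h.1; rw [if_neg ha, if_neg hb] at this
      have : a / 10 = b / 10 := ih (a / 10) (by omega) _ this
      omega

lemma pvGLabel_inj {a b : Int} (ha : 0 ≤ a) (hb : 0 ≤ b) (h : pvGLabel a = pvGLabel b) : a = b := by
  unfold pvGLabel at h
  have h' := congrArg String.toList h
  rw [String.toList_append, String.toList_append, PySem.Int.toList_toStr, PySem.Int.toList_toStr] at h'
  have h'' : PySem.Int.toChars a = PySem.Int.toChars b := by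
    have := List.append_cancel_left h'
    exact this
  unfold PySem.Int.toChars at h''
  rw [if_neg (by omega), if_neg (by omega)] at h''
  have := pvToDigits_inj _ _ h''
  omega

-- a guarded fold over a Nodup list fires at most once, at the matching element
lemma pvFoldl_guard_notmem {σ : Type} (l : List String) (k : String) (F : σ → String → σ) (s : σ)
    (h : k ∉ l) :
    l.foldl (fun s x => if x == k then F s x else s) s = s := by
  induction l generalizing s with
  | nil => rfl
  | cons a t ihl =>
    simp only [List.mem_cons, not_or] at h
    simp only [List.foldl_cons]
    rw [if_neg (by simp only [beq_iff_eq]; exact fun hh => h.1 hh.symm), ihl s h.2]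

lemma pvFoldl_guard {σ : Type} (l : List String) (k : String) (F : σ → String → σ) (s : σ)
    (hnd : l.Nodup) :
    l.foldl (fun s x => if x == k then F s x else s) s = if k ∈ l then F s k else s := by
  induction l generalizing s with
  | nil => simp
  | cons a t ihl =>
    rcases List.nodup_cons.mp hnd with ⟨hna, hnt⟩
    by_cases hak : a = k
    · subst hak
      simp only [List.foldl_cons, beq_self_eq_true, if_pos, List.mem_cons, true_or]
      exact pvFoldl_guard_notmem t a F (F s a) hna
    · simp only [List.foldl_cons]
      rw [if_neg (by simpa using hak), ihl s hnt]
      by_cases hk : k ∈ t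
      · rw [if_pos hk, if_pos (List.mem_cons_of_mem _ hk)]
      · rw [if_neg hk, if_neg (by simp [List.mem_cons, hk, Ne.symm hak])]

-- A's inner loop over the fact keys equals one range-fold of length pvN
lemma pvInner_eq (ex : List (String × List (String × List String))) (s : PySem.Set String) :
    (pvFactsOf ex).keys.foldl (fun s fact =>
        if fact == "in_group" then
          ((PySem.List.pyRange 0 (((pvFactsOf ex).getD fact []).length : Int) 1).foldl
            (fun s g => PySem.Set.add s (pvGLabel g)) s)
        else s) s
    = (PySem.List.pyRange 0 (pvN ex : Int) 1).foldl (fun s g => PySem.Set.add s (pvGLabel g)) s := by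
  rw [pvFoldl_guard _ _ _ _ (by unfold pvFactsOf; exact PySem.Dict.nodup_keys_ofList _)]
  by_cases hmem : "in_group" ∈ (pvFactsOf ex).keys
  · rw [if_pos hmem]; rfl
  · rw [if_neg hmem]
    have hd : (pvFactsOf ex).getD "in_group" [] = [] := by
      apply PySem.Dict.getD_of_not_contains
      rw [PySem.Dict.contains_eq_decide_mem_keys]
      simpa using hmem
    unfold pvN
    rw [hd]
    rw [show ((([] : List String).length : Int)) = 0 from rfl, PySem.List.pyRange_one_eq_nil (le_refl 0)]
    rfl

-- membership in a fold of Set.add over a range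
lemma pvMem_rangeFold (n : Nat) (s : PySem.Set String) (x : String) :
    x ∈ (PySem.List.pyRange 0 (n : Int) 1).foldl (fun s g => PySem.Set.add s (pvGLabel g)) s ↔
      x ∈ s ∨ ∃ g : Int, 0 ≤ g ∧ g < (n : Int) ∧ x = pvGLabel g := by
  rw [PySem.Set.mem_foldl_add]
  constructor
  · rintro (h | ⟨g, hg, rfl⟩)
    · exact Or.inl h
    · exact Or.inr ⟨g, (PySem.List.mem_pyRange_one.mp hg).1, (PySem.List.mem_pyRange_one.mp hg).2, rfl⟩
  · rintro (h | ⟨g, h0, hn, rfl⟩)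
    · exact Or.inl h
    · exact Or.inr ⟨g, PySem.List.mem_pyRange_one.mpr ⟨h0, hn⟩, rfl⟩

-- nodup is preserved by a fold of Set.add
lemma pvNodup_addFold {β : Type} (l : List β) (f : β → String) (s : PySem.Set String)
    (h : s.Nodup) : (l.foldl (fun s b => PySem.Set.add s (f b)) s).Nodup := by
  induction l generalizing s with
  | nil => exact h
  | cons a t ihl => exact ihl _ (PySem.Set.nodup_add _ _ h)

-- membership in A's accumulated set
lemma pvMem_outer (tes : List (List (String × List (String × List String)))) (s : PySem.Set String) (x : String) :
    x ∈ tes.foldl (fun s ex =>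
        (PySem.List.pyRange 0 (pvN ex : Int) 1).foldl (fun s g => PySem.Set.add s (pvGLabel g)) s) s ↔
      x ∈ s ∨ ∃ ex ∈ tes, ∃ g : Int, 0 ≤ g ∧ g < (pvN ex : Int) ∧ x = pvGLabel g := by
  induction tes generalizing s with
  | nil => simp
  | cons e t ihl =>
    simp only [List.foldl_cons]
    rw [ihl, pvMem_rangeFold]
    constructor
    · rintro ((h | ⟨g, h0, hn, rfl⟩) | ⟨ex, hex, g, h0, hn, rfl⟩)
      · exact Or.inl h
      · exact Or.inr ⟨e, List.mem_cons_self, g, h0, hn, rfl⟩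
      · exact Or.inr ⟨ex, List.mem_cons_of_mem _ hex, g, h0, hn, rfl⟩
    · rintro (h | ⟨ex, hex, g, h0, hn, rfl⟩)
      · exact Or.inl (Or.inl h)
      · rcases List.mem_cons.mp hex with rfl | hex
        · exact Or.inl (Or.inr ⟨g, h0, hn, rfl⟩)
        · exact Or.inr ⟨ex, hex, g, h0, hn, rfl⟩

-- a value is below the running max iff below some list element (Nat)
lemma pvLt_foldl_max (l : List (List (String × List (String × List String)))) (m k : Nat) :
    k < l.foldl (fun m ex => max m (pvN ex)) m ↔ k < m ∨ ∃ ex ∈ l, k < pvN ex := by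
  induction l generalizing m with
  | nil => simp
  | cons e t ihl =>
    simp only [List.foldl_cons]
    rw [ihl]
    constructor
    · rintro (h | h)
      · rcases lt_max_iff.mp h with h | h
        · exact Or.inl h
        · exact Or.inr ⟨e, List.mem_cons_self, h⟩
      · rcases h with ⟨ex, hex, h⟩
        exact Or.inr ⟨ex, List.mem_cons_of_mem _ hex, h⟩
    · rintro (h | ⟨ex, hex, h⟩)
      · exact Or.inl (lt_max_iff.mpr (Or.inl h))
      · rcases List.mem_cons.mp hex with rfl | hex
        · exact Or.inl (lt_max_iff.mpr (Or.inr h))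
        · exact Or.inr ⟨ex, hex, h⟩

-- the two group-id lists are permutations of each other
lemma pvPerm (tes : List (List (String × List (String × List String)))) :
    (tes.foldl (fun s ex =>
        (PySem.List.pyRange 0 (pvN ex : Int) 1).foldl (fun s g => PySem.Set.add s (pvGLabel g)) s)
      PySem.Set.empty).Perm
    ((PySem.List.pyRange 0 ((tes.foldl (fun m ex => max m (pvN ex)) 0 : Nat) : Int) 1).map pvGLabel) := by
  set M : Nat := tes.foldl (fun m ex => max m (pvN ex)) 0 with hM
  apply (List.perm_ext_iff_of_nodup ?_ ?_).mpr
  · intro x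
    rw [pvMem_outer]
    simp only [PySem.Set.empty, List.not_mem_nil, false_or, List.mem_map]
    constructor
    · rintro ⟨ex, hex, g, h0, hn, rfl⟩
      refine ⟨g, PySem.List.mem_pyRange_one.mpr ⟨h0, ?_⟩, rfl⟩
      have : g.toNat < M := (pvLt_foldl_max tes 0 g.toNat).mpr (Or.inr ⟨ex, hex, by omega⟩)
      omega
    · rintro ⟨g, hg, rfl⟩
      rcases PySem.List.mem_pyRange_one.mp hg with ⟨h0, hn⟩
      have : g.toNat < M := by omega
      rcases (pvLt_foldl_max tes 0 g.toNat).mp this with h | ⟨ex, hex, h⟩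
      · omega
      · exact ⟨ex, hex, g, h0, by omega, rfl⟩
  · -- the accumulated set is nodup
    have : ∀ (l : List (List (String × List (String × List String)))) (s : PySem.Set String),
        s.Nodup → (l.foldl (fun s ex =>
          (PySem.List.pyRange 0 (pvN ex : Int) 1).foldl (fun s g => PySem.Set.add s (pvGLabel g)) s) s).Nodup := by
      intro l
      induction l with
      | nil => intro s hs; exact hs
      | cons e t ihl => intro s hs; exact ihl _ (pvNodup_addFold _ _ _ hs)
    exact this tes PySem.Set.empty (by simp [PySem.Set.empty])
  · apply List.Nodup.map_on
    · intro x hx y hy h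
      exact pvGLabel_inj (PySem.List.mem_pyRange_one.mp hx).1 (PySem.List.mem_pyRange_one.mp hy).1 h
    · exact PySem.List.nodup_pyRange_one 0 _

-- ===== VERDICT (by name: the statement is the Claim_ definition above) =====
theorem generate_arg_domains_spec : Claim_equal_generate_arg_domains := by
  intro tes _ _
  have hA : generate_arg_domains tes
      = pvResult (PySem.List.sorted (tes.foldl (fun s ex =>
          (pvFactsOf ex).keys.foldl (fun s fact =>
            if fact == "in_group" then
              (PySem.List.pyRange 0 ((((pvFactsOf ex).getD fact []).length : Nat) : Int) 1).foldl
                (fun s g => PySem.Set.add s (pvGLabel g)) s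
            else s) s) PySem.Set.empty) (fun x => x)) (pvImgIds tes.length) := rfl
  have hB : generate_arg_domains_alt tes
      = pvResult (PySem.List.sorted ((PySem.List.pyRange 0
          ((tes.foldl (fun m ex => max m (pvN ex)) 0 : Nat) : Int) 1).map pvGLabel) (fun x => x))
          (pvImgIds tes.length) := rfl
  show generate_arg_domains tes = generate_arg_domains_alt tes
  rw [hA, hB]
  congr 1
  rw [PySem.List.foldl_congr_mem tes _
        (fun s ex => (PySem.List.pyRange 0 ((pvN ex : Nat) : Int) 1).foldl
          (fun s g => PySem.Set.add s (pvGLabel g)) s)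
        PySem.Set.empty (fun s ex _ => pvInner_eq ex s)]
  exact PySem.List.sorted_eq_sorted_of_perm _ _ (fun x : String => x) (fun a b h => h) (pvPerm tes)
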